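-- pv_equiv track=rewrite | github.com/Daniel-Ceriana/Ceriana_Daniel_PP_Labo1 | funciones_generales.py | buscar_por_pelo
-- ===== SOURCE A (Python) =====
-- def buscar_por_pelo(lista:list,key:str):
--     '''
--     agrupa items en un diccionario segun la key, aunque contenga dos valores
--             separados por un "/"
--     Parametros:  lista:list => lista de items
--                 key:str => key a comparar
--     retorno: diccionario con los items separados por la key
--     '''
--     aux = {}
--     for item in lista:
--         if not "/" in item[key]:
--             if item[key].capitalize() in aux:
--                 aux[item[key].capitalize()].append(item)
--             else:
--                 aux[item[key].capitalize()]=[item]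
--         else:
--             #clasifica a los que tienen varios colores en ambas categorias
--             #ej: white/brown pasa a white y a brown
--             #       y no crea una categoria "white/brown"
--             colores_aux = item[key].split("/")
--             for color in colores_aux:
--                 color_normalizado = color.capitalize().strip()
--                 if color_normalizado in aux:
--                     aux[color_normalizado].append(item)
--                 else:
--                     aux[color_normalizado]=[item]
--     return aux
-- ===== SOURCE B (Python) =====
-- def buscar_por_pelo(lista: list, key: str):
--     '''Two-stage version: first compute the first-occurrence order of the
--     normalized keys, then build each bucket by scanning the whole list.'''
--     def keys_of(item):
--         v = item[key]
--         if "/" not in v: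
--             return [v.capitalize()]
--         return [c.capitalize().strip() for c in v.split("/")]
--     order = []
--     seen = set()
--     for item in lista:
--         for k in keys_of(item):
--             if k not in seen:
--                 seen.add(k)
--                 order.append(k)
--     return {k: [item for item in lista for kk in keys_of(item) if kk == k]
--             for k in order}
-- ===== Notes on version B (the rewrite author's own statement) =====
-- stated objective: alternative
-- what changed: B replaces A's single incremental dict-building pass (membership-test then append-or-create per key) by two staged passes: first collect the first-occurrence order of the normalized keys, then build each bucket independently by scanning the whole input list for items whose key list contains it (with multiplicity).
import Mathlib
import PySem

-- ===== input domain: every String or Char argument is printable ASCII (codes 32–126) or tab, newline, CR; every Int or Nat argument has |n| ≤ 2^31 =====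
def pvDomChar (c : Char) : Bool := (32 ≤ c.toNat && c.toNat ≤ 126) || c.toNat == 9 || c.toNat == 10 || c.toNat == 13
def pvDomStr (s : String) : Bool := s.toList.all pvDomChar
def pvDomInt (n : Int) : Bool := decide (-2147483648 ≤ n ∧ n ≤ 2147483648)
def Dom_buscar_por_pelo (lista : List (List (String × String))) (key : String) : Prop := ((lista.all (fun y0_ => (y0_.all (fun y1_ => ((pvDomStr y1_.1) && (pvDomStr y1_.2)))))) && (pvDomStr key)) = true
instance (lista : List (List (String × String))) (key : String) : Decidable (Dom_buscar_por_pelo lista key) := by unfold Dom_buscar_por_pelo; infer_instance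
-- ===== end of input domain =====

-- B replaces A's single incremental dict-insertion pass by two staged passes
-- (collect the first-occurrence key order, then build each bucket by a scan);
-- objective: alternative decomposition, same results, not faster.

-- ===== PORT A =====
-- str.capitalize, ported by hand (exact on the ASCII domain)
def pvCap (s : String) : String :=
  String.ofList (match s.toList with
    | [] => []
    | c :: rest => c.toUpper :: rest.map Char.toLower)

-- one bucket insertion as A writes it: membership test, then append or create
def pvInsA (aux : PySem.Dict String (List (List (String × String)))) (k : String)
    (item : List (String × String)) : PySem.Dict String (List (List (String × String))) :=
  if aux.contains k then aux.insert k (aux.getD k [] ++ [item]) else aux.insert k [item]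

def buscar_por_pelo (lista : List (List (String × String))) (key : String) : List (String × List (List (String × String))) :=
  (lista.foldl (fun aux item =>
    let v := ((PySem.Dict.mk item).get? key).getD ""   -- Pre_ guarantees the key is present
    if PySem.Str.isIn "/" v = false then
      pvInsA aux (pvCap v) item
    else
      (((PySem.Str.split? v "/").getD [])).foldl
        (fun aux color => pvInsA aux (PySem.Str.strip (pvCap color)) item) aux)
    PySem.Dict.empty).items

-- ===== PORT B =====
-- keys_of(item) of Source B
def pvKeysOf (key : String) (item : List (String × String)) : List String :=
  let v := ((PySem.Dict.mk item).get? key).getD ""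
  if PySem.Str.isIn "/" v then
    (((PySem.Str.split? v "/").getD [])).map (fun c => PySem.Str.strip (pvCap c))
  else [pvCap v]

def buscar_por_pelo_alt (lista : List (List (String × String))) (key : String) : List (String × List (List (String × String))) :=
  -- pass 1: first-occurrence order of the normalized keys (seen : set, order : list)
  let so := lista.foldl (fun so item =>
      (pvKeysOf key item).foldl (fun so k =>
        if PySem.Set.contains so.1 k then so else (PySem.Set.add so.1 k, so.2 ++ [k])) so)
    ((PySem.Set.empty : PySem.Set String), ([] : List String))
  -- pass 2: one bucket per key, built by scanning the whole list
  so.2.map (fun k => (k,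
    lista.flatMap (fun item => ((pvKeysOf key item).filter (fun kk => kk == k)).map (fun _ => item))))

-- ===== PRECONDITION & SPEC =====
-- Pre_ excludes exactly the inputs where some item lacks the key, on which A raises KeyError.
def Pre_buscar_por_pelo (lista : List (List (String × String))) (key : String) : Prop :=
  (lista.all (fun item => (PySem.Dict.mk item).contains key)) = true
instance (lista : List (List (String × String))) (key : String) : Decidable (Pre_buscar_por_pelo lista key) := by unfold Pre_buscar_por_pelo; infer_instance
def pvWitness_buscar_por_pelo : (List (List (String × String))) × String :=
  ([[("c", "white/brown")], [("c", "white")], [("c", " brown /Black/")]], "c")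
def Spec_buscar_por_pelo (lista : List (List (String × String))) (key : String) (out : List (String × List (List (String × String)))) : Prop := out = buscar_por_pelo_alt lista key
instance (lista : List (List (String × String))) (key : String) (out : List (String × List (List (String × String)))) : Decidable (Spec_buscar_por_pelo lista key out) := by unfold Spec_buscar_por_pelo; infer_instance

-- ===== CLAIM =====
def Claim_equal_buscar_por_pelo : Prop := ∀ (lista : List (List (String × String))) (key : String), Dom_buscar_por_pelo lista key → Pre_buscar_por_pelo lista key → Spec_buscar_por_pelo lista key (buscar_por_pelo lista key)

-- ===== LEMMAS AND PROOFS =====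

-- the flattened (key, item) pair stream both programs process
def pvPairs (lista : List (List (String × String))) (key : String) : List (String × List (String × String)) :=
  lista.flatMap (fun item => (pvKeysOf key item).map (fun k => (k, item)))

-- A's branch-insert is dict.modify (= d[k] = d.get(k, []) + [item])
theorem pvInsA_eq (aux : PySem.Dict String (List (List (String × String)))) (k : String)
    (item : List (String × String)) :
    pvInsA aux k item = aux.modify k [] (· ++ [item]) := by
  unfold pvInsA
  by_cases h : aux.contains k = true
  · simp [h, PySem.Dict.modify]
  · simp only [Bool.not_eq_true] at h
    simp [h, PySem.Dict.getD_of_not_contains aux _ h, PySem.Dict.modify]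

-- folding over a flatMap is the nested fold
theorem pv_foldl_flatMap {α β γ : Type} (l : List α) (f : α → List β) (g : γ → β → γ) (init : γ) :
    (l.flatMap f).foldl g init = l.foldl (fun acc x => (f x).foldl g acc) init := by
  induction l generalizing init with
  | nil => rfl
  | cons x xs ih => simp [List.flatMap_cons, List.foldl_append, ih]

-- A's whole loop, re-expressed as one fold over the pair stream
theorem pvA_eq (lista : List (List (String × String))) (key : String) :
    buscar_por_pelo lista key =
      ((pvPairs lista key).foldl (fun d p => d.modify p.1 [] (· ++ [p.2])) PySem.Dict.empty).items := by
  unfold buscar_por_pelo pvPairs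
  rw [pv_foldl_flatMap]
  congr 1
  apply PySem.List.foldl_congr_mem
  intro aux item _
  simp only [pvKeysOf]
  by_cases h : PySem.Str.isIn "/" (((PySem.Dict.mk item).get? key).getD "") = true
  · rw [if_neg (by rw [h]; simp), if_pos h, List.foldl_map, List.foldl_map]
    simp [pvInsA_eq]
  · simp only [Bool.not_eq_true] at h
    rw [if_pos h, if_neg (by rw [h]; simp)]
    simp [pvInsA_eq]

-- the diagonal invariant of B's first pass: seen and order stay the same list,
-- and together they fold Set.add over the keys
theorem pv_diag_foldl (ks : List String) (s : PySem.Set String) :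
    (ks.foldl (fun so k =>
        if PySem.Set.contains so.1 k then so else (PySem.Set.add so.1 k, so.2 ++ [k]))
      (s, (s : List String))) = (ks.foldl PySem.Set.add s, ks.foldl PySem.Set.add s) := by
  induction ks generalizing s with
  | nil => rfl
  | cons k ks ih =>
    rw [List.foldl_cons, List.foldl_cons]
    show List.foldl _ (if PySem.Set.contains (s, (s : List String)).1 k then _ else _) ks = _
    by_cases hm : k ∈ s
    · have e2 : PySem.Set.add s k = s := by simp [PySem.Set.add, hm]
      rw [if_pos (show PySem.Set.contains (s, (s : List String)).1 k = true by simp [hm]), e2]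
      exact ih s
    · have e2 : PySem.Set.add s k = s ++ [k] := by simp [PySem.Set.add, hm]
      rw [if_neg (show ¬ PySem.Set.contains (s, (s : List String)).1 k = true by simp [hm]), e2]
      exact ih (s ++ [k])

-- B's first pass computes the first-occurrence dedup of the key stream
theorem pvB_order (lista : List (List (String × String))) (key : String) :
    (lista.foldl (fun so item =>
        (pvKeysOf key item).foldl (fun so k =>
          if PySem.Set.contains so.1 k then so else (PySem.Set.add so.1 k, so.2 ++ [k])) so)
      ((PySem.Set.empty : PySem.Set String), ([] : List String))).2 =
    PySem.List.dedup ((pvPairs lista key).map Prod.fst) := by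
  have key_stream : (pvPairs lista key).map Prod.fst = lista.flatMap (pvKeysOf key) := by
    simp [pvPairs, List.map_flatMap, List.map_map, Function.comp_def]
  have main : ∀ (l : List (List (String × String))) (s : PySem.Set String),
      (l.foldl (fun so item =>
        (pvKeysOf key item).foldl (fun so k =>
          if PySem.Set.contains so.1 k then so else (PySem.Set.add so.1 k, so.2 ++ [k])) so)
      (s, (s : List String))) =
      ((l.flatMap (pvKeysOf key)).foldl PySem.Set.add s,
       (l.flatMap (pvKeysOf key)).foldl PySem.Set.add s) := by
    intro l
    induction l with
    | nil => intro s; rfl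
    | cons item rest ih =>
      intro s
      rw [List.foldl_cons, pv_diag_foldl, List.flatMap_cons, List.foldl_append]
      exact ih _
  have h2 := congrArg Prod.snd (main lista PySem.Set.empty)
  rw [key_stream, PySem.List.dedup_eq_ofList, PySem.Set.ofList_eq_foldl]
  exact h2

-- B's bucket scan equals the filtered pair stream
theorem pvB_bucket (lista : List (List (String × String))) (key k : String) :
    lista.flatMap (fun item => ((pvKeysOf key item).filter (fun kk => kk == k)).map (fun _ => item)) =
    ((pvPairs lista key).filter (fun p => p.1 == k)).map (·.2) := by
  simp [pvPairs, List.filter_flatMap, List.map_flatMap, List.filter_map, List.map_map, Function.comp_def]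

-- the grouping fold, characterised: items = first-occurrence keys with their scans
theorem pv_items_fold (ps : List (String × List (String × String))) :
    ((ps.foldl (fun d p => d.modify p.1 [] (· ++ [p.2])) PySem.Dict.empty)).items
    = (PySem.List.dedup (ps.map Prod.fst)).map
        (fun k => (k, (ps.filter (fun p => p.1 == k)).map (·.2))) := by
  have hnd : ((ps.foldl (fun d p => d.modify p.1 [] (· ++ [p.2]))
      (PySem.Dict.empty (ν := List (List (String × String)))))).keys.Nodup := by
    apply PySem.Dict.nodup_keys_foldl_modify_key
    simp
  rw [PySem.Dict.items_eq_map_keys _ hnd []]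
  rw [PySem.Dict.keys_foldl_modify_key ps Prod.fst []
    (fun d p => (· ++ [p.2])) PySem.Dict.empty]
  have hk2 : PySem.Set.update ((PySem.Dict.empty (ν := List (List (String × String)))).keys)
      (ps.map Prod.fst) = PySem.List.dedup (ps.map Prod.fst) := by
    simp [PySem.Set.update, PySem.List.dedup_eq_ofList, PySem.Set.ofList_eq_foldl,
      PySem.Dict.keys_empty]
  rw [hk2]
  apply List.map_congr_left
  intro k _
  rw [PySem.Dict.getD_foldl_modify_append]
  simp

-- ===== VERDICT =====
theorem buscar_por_pelo_spec : Claim_equal_buscar_por_pelo := by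
  intro lista key _ _
  unfold Spec_buscar_por_pelo
  rw [pvA_eq, pv_items_fold]
  simp only [buscar_por_pelo_alt]
  rw [pvB_order]
  apply List.map_congr_left
  intro k _
  rw [pvB_bucket]
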